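-- pv_equiv track=rewrite | github.com/rob256/adventofcode2020 | python3/day_24/day_24_2.py | split_move
-- ===== SOURCE A (Python) =====
-- from typing import Tuple, Iterable, List, Dict
--
-- def split_move(move: str) -> Iterable[str]:
--     i = 0
--     while i < len(move):
--         if move[i] in ['n', 's']:
--             yield move[i: i + 2]
--             i += 2
--         else:
--             yield move[i]
--             i += 1
-- ===== SOURCE B (Python) =====
-- def split_move(move: str):
--     pending = None
--     for c in move:
--         if pending is not None:
--             yield pending + c
--             pending = None
--         elif c in 'ns':
--             pending = c
--         else:
--             yield c
--     if pending is not None: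
--         yield pending
-- ===== Notes on version B (the rewrite author's own statement) =====
-- stated objective: alternative
-- what changed: Replaced the index-based while loop with slicing move[i:i+2] by a single for-loop over characters carrying a one-character pending state (emit pending+c, or buffer c if it is n/s, or emit c), flushing the pending character at the end.
import Mathlib
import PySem

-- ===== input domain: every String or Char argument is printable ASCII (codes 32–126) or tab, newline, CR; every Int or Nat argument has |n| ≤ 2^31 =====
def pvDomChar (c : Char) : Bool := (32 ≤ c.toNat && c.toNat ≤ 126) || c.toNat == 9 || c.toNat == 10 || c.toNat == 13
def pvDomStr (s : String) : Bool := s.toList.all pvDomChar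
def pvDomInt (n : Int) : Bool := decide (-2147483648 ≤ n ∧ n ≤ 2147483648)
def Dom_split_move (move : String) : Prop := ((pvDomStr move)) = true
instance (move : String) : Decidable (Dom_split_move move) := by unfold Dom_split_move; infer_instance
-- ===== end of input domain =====

-- B replaces A's index-and-slice while loop by one for-loop over the characters with a pending
-- one-character buffer (objective: alternative decomposition, same cost). Both are total.

-- ===== PORT A =====
-- A's while loop over index i, rendered as recursion on the remaining suffix move[i:]:
-- move[i] is the head, the slice move[i:i+2] is take 2 of the suffix, i += 2 drops one more char.
def splitMoveGo : List Char → List String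
  | [] => []
  | c :: rest =>
    if c = 'n' ∨ c = 's' then
      String.ofList ((c :: rest).take 2) :: splitMoveGo rest.tail
    else
      String.ofList [c] :: splitMoveGo rest
termination_by cs => cs.length
decreasing_by
  all_goals simp [List.length_tail]

def split_move (move : String) : List String := splitMoveGo move.toList

-- ===== PORT B =====
-- state: (tokens emitted so far, pending 'n'/'s' awaiting its second character)
def splitMoveStep (st : List String × Option Char) (c : Char) : List String × Option Char :=
  match st.2 with
  | some p => (st.1 ++ [String.ofList [p, c]], none)
  | none =>
    if c = 'n' ∨ c = 's' then (st.1, some c)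
    else (st.1 ++ [String.ofList [c]], none)

-- final flush of the pending character
def splitMoveFinish (st : List String × Option Char) : List String :=
  match st.2 with
  | some p => st.1 ++ [String.ofList [p]]
  | none => st.1

def split_move_alt (move : String) : List String :=
  splitMoveFinish (move.toList.foldl splitMoveStep ([], none))

-- ===== PRECONDITION & SPEC =====
def Spec_split_move (move : String) (out : List String) : Prop := out = split_move_alt move
instance (move : String) (out : List String) : Decidable (Spec_split_move move out) := by unfold Spec_split_move; infer_instance

-- ===== CLAIM (what is proved, stated in full; the proofs are below) =====
def Claim_equal_split_move : Prop := ∀ (move : String), Dom_split_move move → Spec_split_move move (split_move move)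

-- ===== LEMMAS AND PROOFS =====
theorem splitMove_key (cs : List Char) (acc : List String) :
    splitMoveFinish (cs.foldl splitMoveStep (acc, none)) = acc ++ splitMoveGo cs := by
  match cs with
  | [] => simp [splitMoveFinish, splitMoveGo]
  | c :: rest =>
    by_cases h : c = 'n' ∨ c = 's'
    · match rest with
      | [] => simp [splitMoveStep, splitMoveFinish, splitMoveGo, h]
      | c2 :: rest2 =>
        have ih := splitMove_key rest2 (acc ++ [String.ofList [c, c2]])
        simp only [List.foldl_cons, splitMoveStep, h, if_pos] at ih ⊢
        simp [ih, splitMoveGo, h]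
    · have ih := splitMove_key rest (acc ++ [String.ofList [c]])
      simp only [List.foldl_cons, splitMoveStep, h, if_neg, not_false_iff] at ih ⊢
      simp only [ih, splitMoveGo, if_neg h, List.append_assoc, List.singleton_append]
termination_by cs.length

-- ===== VERDICT (by name: the statement is the Claim_ definition above) =====
theorem split_move_spec : Claim_equal_split_move := by
  intro move _
  unfold Spec_split_move split_move split_move_alt
  simpa using (splitMove_key move.toList []).symm
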